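-- pv_equiv track=rewrite | github.com/wanderindev/dfgdp-webapp | backend/src/services/editor_service.py | _extract_relevant_sections
-- ===== SOURCE A (Python) =====
-- from typing import Any, Dict, List, Optional, Tuple
--
-- def _extract_relevant_sections(full_text: str, sections: List[str]) -> str:
--     """
--     Extract the relevant section text from the original content, ignoring 'Introduction'/'Conclusion'.
--     """
--     content_accum = ""
--     for section in sections:
--         if section in ["Introduction", "Conclusion"]:
--             continue
--
--         # Try both "## " and "### "
--         patterns = [f"## {section}", f"### {section}"]
--         start_idx = -1
--         for pat in patterns:
--             idx = full_text.find(pat)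
--             if idx != -1:
--                 start_idx = idx
--                 break
--
--         if start_idx != -1:
--             # Find the next major "## " heading or end-of-content
--             next_section_idx = full_text.find("\n## ", start_idx + 1)
--             end_idx = next_section_idx if next_section_idx != -1 else len(full_text)
--             content_accum += full_text[start_idx:end_idx].strip() + "\n\n"
--
--     return content_accum.strip()
-- ===== SOURCE B (Python) =====
-- from typing import List
--
--
-- def _extract_relevant_sections(full_text: str, sections: List[str]) -> str:
--     # Index every occurrence of "## " once, then resolve each section against
--     # that (short) position list instead of re-scanning the whole text per section.
--     n = len(full_text)
--     occ = []
--     i = full_text.find("## ")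
--     while i != -1:
--         occ.append(i)
--         i = full_text.find("## ", i + 1)
--
--     parts = ""
--     for section in sections:
--         if section in ("Introduction", "Conclusion"):
--             continue
--         # "## {section}" match: an occurrence p of "## " followed by section
--         start = -1
--         for p in occ:
--             if full_text[p + 3:p + 3 + len(section)] == section:
--                 start = p
--                 break
--         if start == -1:
--             # "### {section}" match: occurrence p preceded by '#', followed by section
--             for p in occ:
--                 if p >= 1 and full_text[p - 1:p] == "#" and full_text[p + 3:p + 3 + len(section)] == section:
--                     start = p - 1
--                     break
--         if start != -1:
--             # next "\n## " strictly after start: occurrence p >= start+2 preceded by '\n'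
--             end = n
--             for p in occ:
--                 if p >= start + 2 and full_text[p - 1:p] == "\n":
--                     end = p - 1
--                     break
--             parts += full_text[start:end].strip() + "\n\n"
--     return parts.strip()
-- ===== Notes on version B (the rewrite author's own statement) =====
-- stated objective: faster
-- what changed: Instead of searching the full text for every section's pattern and again for the next heading (a fresh full-text scan per section), B indexes all positions of "## " in one pass and resolves each section's start, '###' fallback and end boundary by scanning only that short position list.
import Mathlib
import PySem

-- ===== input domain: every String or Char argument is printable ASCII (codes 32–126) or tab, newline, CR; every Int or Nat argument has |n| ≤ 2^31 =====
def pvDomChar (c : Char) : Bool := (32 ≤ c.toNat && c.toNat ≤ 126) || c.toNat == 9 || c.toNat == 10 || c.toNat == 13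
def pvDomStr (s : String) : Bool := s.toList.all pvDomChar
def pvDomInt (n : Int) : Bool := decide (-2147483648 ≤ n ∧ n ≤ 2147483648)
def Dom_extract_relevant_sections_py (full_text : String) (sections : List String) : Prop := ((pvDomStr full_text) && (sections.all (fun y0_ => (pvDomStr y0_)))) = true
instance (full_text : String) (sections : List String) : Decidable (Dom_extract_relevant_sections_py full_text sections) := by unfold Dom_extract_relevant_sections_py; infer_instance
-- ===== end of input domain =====

-- B replaces A's per-section full-text scans by one pass that indexes every "## " position,
-- resolving each section's start, "###" fallback and end boundary on that short position list (objective: faster).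

-- ===== PORT A =====
-- loop body of A's `for section in sections` (acc = content_accum)
def pvAStep (s : List Char) (acc : List Char) (sec : String) : List Char :=
  if sec = "Introduction" ∨ sec = "Conclusion" then acc else
  let pats : List (List Char) := ["## ".toList ++ sec.toList, "### ".toList ++ sec.toList]
  -- `for pat in patterns: idx = full_text.find(pat); if idx != -1: start_idx = idx; break`
  let start_idx : Int := pats.foldl (fun st pat =>
    if st ≠ -1 then st else
    let idx := PySem.Chars.find s pat
    if idx ≠ -1 then idx else st) (-1)
  if start_idx ≠ -1 then
    let next_section_idx := PySem.Chars.findFrom s "\n## ".toList (start_idx + 1) none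
    let end_idx : Int := if next_section_idx ≠ -1 then next_section_idx else (s.length : Int)
    acc ++ PySem.Chars.strip (PySem.Chars.slice s (some start_idx) (some end_idx)) ++ "\n\n".toList
  else acc

def extract_relevant_sections_py (full_text : String) (sections : List String) : String :=
  String.ofList (PySem.Chars.strip (sections.foldl (pvAStep full_text.toList) []))

-- ===== PORT B =====
-- port of B's slice comparison `full_text[j:j+len(sec)] == sec` (0 ≤ j, in-order bounds: slice = drop/take)
def pvMatchAt (s sec : List Char) (j : Nat) : Bool := (s.drop j).take sec.length == sec

-- port of B's `while i != -1` find loop collecting all "## " positions; fuel makes it total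
-- (positions strictly increase, so s.length + 1 steps always suffice)
def pvCollectOcc (s : List Char) (i : Nat) : Nat → List Nat
  | 0 => []
  | fuel + 1 =>
    let j := PySem.Chars.findFrom s "## ".toList (i : Int) none
    if j = -1 then [] else j.toNat :: pvCollectOcc s (j.toNat + 1) fuel

def pvOcc (s : List Char) : List Nat := pvCollectOcc s 0 (s.length + 1)

-- loop body of B's `for section in sections` (acc = parts)
def pvBStep (s : List Char) (occ : List Nat) (acc : List Char) (sec : String) : List Char :=
  if sec = "Introduction" ∨ sec = "Conclusion" then acc else
  let secL := sec.toList
  let start? : Option Nat :=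
    match occ.find? (fun p => pvMatchAt s secL (p + 3)) with
    | some p => some p
    | none =>
      match occ.find? (fun p => decide (1 ≤ p) && pvMatchAt s ['#'] (p - 1) && pvMatchAt s secL (p + 3)) with
      | some p => some (p - 1)
      | none => none
  match start? with
  | none => acc
  | some st =>
    let en : Nat :=
      match occ.find? (fun p => decide (st + 2 ≤ p) && pvMatchAt s ['\n'] (p - 1)) with
      | some p => p - 1
      | none => s.length
    acc ++ PySem.Chars.strip ((s.drop st).take (en - st)) ++ "\n\n".toList

def extract_relevant_sections_py_alt (full_text : String) (sections : List String) : String :=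
  String.ofList (PySem.Chars.strip (sections.foldl (pvBStep full_text.toList (pvOcc full_text.toList)) []))

-- ===== PRECONDITION & SPEC =====
def Spec_extract_relevant_sections_py (full_text : String) (sections : List String) (out : String) : Prop := out = extract_relevant_sections_py_alt full_text sections
instance (full_text : String) (sections : List String) (out : String) : Decidable (Spec_extract_relevant_sections_py full_text sections out) := by unfold Spec_extract_relevant_sections_py; infer_instance

-- ===== CLAIM (what is proved, stated in full; the proofs are below) =====
def Claim_equal_extract_relevant_sections_py : Prop := ∀ (full_text : String) (sections : List String), Dom_extract_relevant_sections_py full_text sections → Spec_extract_relevant_sections_py full_text sections (extract_relevant_sections_py full_text sections)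

-- ===== LEMMAS AND PROOFS =====

theorem pv_append_prefix {α : Type} (a b l : List α) :
    (a ++ b) <+: l ↔ a <+: l ∧ b <+: l.drop a.length := by
  constructor
  · rintro ⟨t, ht⟩
    refine ⟨⟨b ++ t, by simpa using ht⟩, ⟨t, ?_⟩⟩
    have : l.drop a.length = b ++ t := by
      rw [← ht]; simp
    rw [this]
  · rintro ⟨ha, ⟨t, ht⟩⟩
    have hl : l = a ++ l.drop a.length := by
      have := List.prefix_iff_eq_take.mp ha
      conv_lhs => rw [← List.take_append_drop a.length l]
      rw [← this]
    exact ⟨t, by rw [List.append_assoc, ht, ← hl]⟩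

theorem pv_matchAt_iff (s sec : List Char) (j : Nat) :
    pvMatchAt s sec j = true ↔ sec <+: s.drop j := by
  rw [pvMatchAt, beq_iff_eq, List.prefix_iff_eq_take, eq_comm]

theorem pv_find?_min {l : List Nat} {Q : Nat → Bool} (hl : l.Pairwise (· < ·)) {p : Nat}
    (hp : p ∈ l) (hQ : Q p = true) (hmin : ∀ q ∈ l, q < p → ¬ Q q = true) :
    l.find? Q = some p := by
  induction l with
  | nil => simp at hp
  | cons a t ih =>
    rcases List.pairwise_cons.mp hl with ⟨halt, ht⟩
    by_cases ha : Q a = true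
    · have : p = a := by
        rcases List.mem_cons.mp hp with h | h
        · exact h
        · exact absurd ha (hmin a (List.mem_cons_self) (halt p h))
      simp [ha, this]
    · have hpa : p ≠ a := fun h => ha (h ▸ hQ)
      have hpt : p ∈ t := (List.mem_cons.mp hp).resolve_left hpa
      have hfa : Q a = false := by simpa using ha
      rw [List.find?_cons, hfa]
      exact ih ht hpt (fun q hq hlt => hmin q (List.mem_cons_of_mem _ hq) hlt)

theorem pv_prefix_drop_infix {a l : List Char} {n : Nat} (h : a <+: l.drop n) : a <:+: l :=
  (h.isInfix).trans (List.drop_suffix n l).isInfix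

theorem pv_prefix_drop_infix_drop {a l : List Char} {k p : Nat} (hk : k ≤ p)
    (h : a <+: l.drop p) : a <:+: l.drop k := by
  refine pv_prefix_drop_infix (n := p - k) ?_
  rwa [List.drop_drop, Nat.add_sub_cancel' hk]

theorem pv_collect_mem (s : List Char) :
    ∀ (fuel i : Nat), i ≤ s.length → s.length + 1 ≤ fuel + i →
      ∀ p, p ∈ pvCollectOcc s i fuel ↔ (i ≤ p ∧ "## ".toList <+: s.drop p) := by
  intro fuel
  induction fuel with
  | zero => intro i hi hf; exact absurd hi (by omega)
  | succ fuel ih =>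
    intro i hi hf p
    by_cases hj : PySem.Chars.findFrom s "## ".toList (i : Int) none = -1
    · have hinf : ¬ ("## ".toList <:+: s.drop i) :=
        (PySem.Chars.findFrom_natCast_eq_neg_one_iff s _ i hi).mp hj
      simp only [pvCollectOcc, hj, if_pos, List.not_mem_nil, false_iff, not_and]
      intro hip hpre
      exact hinf (pv_prefix_drop_infix_drop hip hpre)
    · obtain ⟨hki, hpre, hmin⟩ := PySem.Chars.findFrom_natCast_spec s "## ".toList i hi hj
      set jz := PySem.Chars.findFrom s "## ".toList (i : Int) none with hjz
      have hj0 : 0 ≤ jz := le_trans (by positivity) hki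
      have hij : i ≤ jz.toNat := by omega
      have hjlen : jz.toNat < s.length := by
        rcases hpre with ⟨t, ht⟩
        have h3 : (s.drop jz.toNat).length = s.length - jz.toNat := List.length_drop ..
        have : ("## ".toList ++ t).length = s.length - jz.toNat := by rw [ht, h3]
        simp at this
        omega
      have ihm := ih (jz.toNat + 1) (by omega) (by omega)
      simp only [pvCollectOcc, if_neg hj, List.mem_cons, ← hjz, ihm p]
      constructor
      · rintro (rfl | ⟨h1, h2⟩)
        · exact ⟨hij, hpre⟩
        · exact ⟨by omega, h2⟩
      · rintro ⟨h1, h2⟩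
        by_cases hpj : p = jz.toNat
        · exact Or.inl hpj
        · have : ¬ p < jz.toNat := fun hlt => hmin p h1 hlt h2
          exact Or.inr ⟨by omega, h2⟩

theorem pv_occ_mem (s : List Char) (p : Nat) :
    p ∈ pvOcc s ↔ "## ".toList <+: s.drop p := by
  rw [pvOcc, pv_collect_mem s (s.length + 1) 0 (by omega) (by omega) p]
  simp

theorem pv_collect_pairwise (s : List Char) :
    ∀ (fuel i : Nat), i ≤ s.length → s.length + 1 ≤ fuel + i →
      (pvCollectOcc s i fuel).Pairwise (· < ·) := by
  intro fuel
  induction fuel with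
  | zero => intro i hi hf; exact absurd hi (by omega)
  | succ fuel ih =>
    intro i hi hf
    by_cases hj : PySem.Chars.findFrom s "## ".toList (i : Int) none = -1
    · simp only [pvCollectOcc, hj, if_pos]
      exact List.Pairwise.nil
    · obtain ⟨hki, hpre, hmin⟩ := PySem.Chars.findFrom_natCast_spec s "## ".toList i hi hj
      set jz := PySem.Chars.findFrom s "## ".toList (i : Int) none with hjz
      have hjlen : jz.toNat < s.length := by
        rcases hpre with ⟨t, ht⟩
        have h3 : (s.drop jz.toNat).length = s.length - jz.toNat := List.length_drop ..
        have : ("## ".toList ++ t).length = s.length - jz.toNat := by rw [ht, h3]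
        simp at this
        omega
      simp only [pvCollectOcc, if_neg hj, ← hjz]
      refine List.pairwise_cons.mpr ⟨?_, ih _ (by omega) (by omega)⟩
      intro q hq
      have := (pv_collect_mem s fuel (jz.toNat + 1) (by omega) (by omega) q).mp hq
      omega

theorem pv_occ_pairwise (s : List Char) : (pvOcc s).Pairwise (· < ·) :=
  pv_collect_pairwise s (s.length + 1) 0 (by omega) (by omega)

theorem pv_pat_decomp (s pre post : List Char) (q : Nat) :
    (pre ++ "## ".toList ++ post) <+: s.drop q ↔
      (pre <+: s.drop q ∧ "## ".toList <+: s.drop (q + pre.length) ∧ post <+: s.drop (q + pre.length + 3)) := by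
  rw [List.append_assoc, pv_append_prefix, pv_append_prefix, List.drop_drop, List.drop_drop]
  have h3 : ("## ".toList).length = 3 := by decide
  rw [h3]

theorem pv_master (s : List Char) (pre post : List Char) (k : Nat) (hk : k ≤ s.length)
    (Q : Nat → Bool)
    (hQ : ∀ p, "## ".toList <+: s.drop p →
      (Q p = true ↔ (k + pre.length ≤ p ∧ pre.length ≤ p ∧ pre <+: s.drop (p - pre.length) ∧ post <+: s.drop (p + 3)))) :
    PySem.Chars.findFrom s (pre ++ "## ".toList ++ post) (k : Int) none =
      (match (pvOcc s).find? Q with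
       | some p => ((p - pre.length : Nat) : Int)
       | none => -1) := by
  by_cases hneg : PySem.Chars.findFrom s (pre ++ "## ".toList ++ post) (k : Int) none = -1
  · have hinf := (PySem.Chars.findFrom_natCast_eq_neg_one_iff s _ k hk).mp hneg
    have hnone : (pvOcc s).find? Q = none := by
      rw [List.find?_eq_none]
      intro p hp hQp
      have hocc := (pv_occ_mem s p).mp hp
      obtain ⟨h1, h2, h3, h4⟩ := (hQ p hocc).mp hQp
      have hpat : (pre ++ "## ".toList ++ post) <+: s.drop (p - pre.length) := by
        rw [pv_pat_decomp]
        have e1 : p - pre.length + pre.length = p := by omega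
        refine ⟨h3, ?_, ?_⟩ <;> rw [e1] <;> assumption
      exact hinf (pv_prefix_drop_infix_drop (by omega) hpat)
    rw [hnone, hneg]
  · obtain ⟨hge, hpre, hmin⟩ := PySem.Chars.findFrom_natCast_spec s _ k hk hneg
    set jz := PySem.Chars.findFrom s (pre ++ "## ".toList ++ post) (k : Int) none with hjz
    have hj0 : 0 ≤ jz := le_trans (by positivity) hge
    have hkj : k ≤ jz.toNat := by omega
    obtain ⟨hpre1, hpre2, hpre3⟩ := (pv_pat_decomp s pre post jz.toNat).mp hpre
    have hsome : (pvOcc s).find? Q = some (jz.toNat + pre.length) := by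
      refine pv_find?_min (pv_occ_pairwise s) ((pv_occ_mem s _).mpr hpre2) ?_ ?_
      · rw [hQ _ hpre2]
        refine ⟨by omega, by omega, ?_, ?_⟩
        · simpa using hpre1
        · have : jz.toNat + pre.length + 3 = jz.toNat + (pre.length + 3) := by omega
          rw [this] at hpre3
          have e : jz.toNat + pre.length + 3 = jz.toNat + (pre.length + 3) := by omega
          rw [e]
          exact hpre3
      · intro q hq hlt hQq
        have hocc := (pv_occ_mem s q).mp hq
        obtain ⟨h1, h2, h3, h4⟩ := (hQ q hocc).mp hQq
        have hpat : (pre ++ "## ".toList ++ post) <+: s.drop (q - pre.length) := by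
          rw [pv_pat_decomp]
          have e1 : q - pre.length + pre.length = q := by omega
          refine ⟨h3, ?_, ?_⟩ <;> rw [e1] <;> assumption
        exact hmin (q - pre.length) (by omega) (by omega) hpat
    rw [hsome]
    simp only [Nat.add_sub_cancel]
    exact (Int.toNat_of_nonneg hj0).symm

theorem pv_occ_lt {s : List Char} {p : Nat} (hp : p ∈ pvOcc s) : p < s.length := by
  have hpre := (pv_occ_mem s p).mp hp
  rcases hpre with ⟨t, ht⟩
  have h3 : (s.drop p).length = s.length - p := List.length_drop ..
  have : ("## ".toList ++ t).length = s.length - p := by rw [ht, h3]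
  simp at this
  omega

-- the three master instantiations

theorem pv_find_pat1 (s : List Char) (secL : List Char) :
    PySem.Chars.find s ("## ".toList ++ secL) =
      (match (pvOcc s).find? (fun p => pvMatchAt s secL (p + 3)) with
       | some p => (p : Int)
       | none => -1) := by
  have h := pv_master s [] secL 0 (by omega) (fun p => pvMatchAt s secL (p + 3)) ?_
  · rw [← PySem.Chars.findFrom_zero s ("## ".toList ++ secL)]
    simpa using h
  · intro p hp
    simp [pv_matchAt_iff]

theorem pv_find_pat2 (s : List Char) (secL : List Char) :
    PySem.Chars.find s ("### ".toList ++ secL) =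
      (match (pvOcc s).find? (fun p => decide (1 ≤ p) && pvMatchAt s ['#'] (p - 1) && pvMatchAt s secL (p + 3)) with
       | some p => ((p - 1 : Nat) : Int)
       | none => -1) := by
  have h := pv_master s ['#'] secL 0 (by omega)
    (fun p => decide (1 ≤ p) && pvMatchAt s ['#'] (p - 1) && pvMatchAt s secL (p + 3)) ?_
  · rw [← PySem.Chars.findFrom_zero s ("### ".toList ++ secL)]
    have e : "### ".toList ++ secL = ['#'] ++ "## ".toList ++ secL := by
      simp
    rw [e]
    simpa using h
  · intro p hp
    simp only [Bool.and_eq_true, decide_eq_true_eq, pv_matchAt_iff, List.length_cons,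
      List.length_nil]
    constructor
    · rintro ⟨⟨h1, h2⟩, h3⟩; exact ⟨by omega, by omega, h2, h3⟩
    · rintro ⟨h1, h2, h3, h4⟩; exact ⟨⟨by omega, h3⟩, h4⟩

theorem pv_find_pat3 (s : List Char) (st : Nat) (hst : st < s.length) :
    PySem.Chars.findFrom s "\n## ".toList ((st : Int) + 1) none =
      (match (pvOcc s).find? (fun p => decide (st + 2 ≤ p) && pvMatchAt s ['\n'] (p - 1)) with
       | some p => ((p - 1 : Nat) : Int)
       | none => -1) := by
  have h := pv_master s ['\n'] [] (st + 1) (by omega)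
    (fun p => decide (st + 2 ≤ p) && pvMatchAt s ['\n'] (p - 1)) ?_
  · have e : ['\n'] ++ "## ".toList ++ ([] : List Char) = "\n## ".toList := by simp
    rw [e] at h
    have e2 : ((st : Int) + 1) = ((st + 1 : Nat) : Int) := by push_cast; ring
    rw [e2]
    exact h
  · intro p hp
    simp only [Bool.and_eq_true, decide_eq_true_eq, pv_matchAt_iff, List.length_cons,
      List.length_nil]
    constructor
    · rintro ⟨h1, h2⟩; exact ⟨by omega, by omega, h2, List.nil_prefix⟩
    · rintro ⟨h1, h2, h3, h4⟩; exact ⟨by omega, h3⟩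

theorem pv_slice_eq (s : List Char) (a b : Nat) :
    PySem.Chars.slice s (some (a : Int)) (some (b : Int)) = (s.drop a).take (b - a) := by
  simp [PySem.List.slice_natCast]

theorem pv_end_eq (s : List Char) (acc : List Char) (st : Nat) (hst : st < s.length) :
    acc ++ PySem.Chars.strip (PySem.Chars.slice s (some (st : Int))
        (some (if ¬ PySem.Chars.findFrom s "\n## ".toList ((st : Int) + 1) none = -1 then
                 PySem.Chars.findFrom s "\n## ".toList ((st : Int) + 1) none
               else (s.length : Int)))) ++ "\n\n".toList =
      acc ++ PySem.Chars.strip ((s.drop st).take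
        ((match (pvOcc s).find? (fun p => decide (st + 2 ≤ p) && pvMatchAt s ['\n'] (p - 1)) with
          | some p => p - 1
          | none => s.length) - st)) ++ "\n\n".toList := by
  rw [pv_find_pat3 s st hst]
  rcases h : (pvOcc s).find? (fun p => decide (st + 2 ≤ p) && pvMatchAt s ['\n'] (p - 1)) with _ | p
  · rw [if_neg (by simp), pv_slice_eq]
  · have hne : ¬ ((p - 1 : Nat) : Int) = -1 := by omega
    rw [if_pos hne, pv_slice_eq]

theorem pv_fold2 (s p1 p2 : List Char) :
    ([p1, p2]).foldl (fun st pat => if st ≠ -1 then st else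
      let idx := PySem.Chars.find s pat
      if idx ≠ -1 then idx else st) (-1 : Int) =
    (if PySem.Chars.find s p1 ≠ -1 then PySem.Chars.find s p1
     else if PySem.Chars.find s p2 ≠ -1 then PySem.Chars.find s p2 else (-1 : Int)) := by
  simp only [List.foldl_cons, List.foldl_nil]
  split_ifs <;> simp_all

theorem pv_step_eq (s : List Char) (acc : List Char) (sec : String) :
    pvAStep s acc sec = pvBStep s (pvOcc s) acc sec := by
  by_cases hic : sec = "Introduction" ∨ sec = "Conclusion"
  · simp only [pvAStep, pvBStep, if_pos hic]
  simp only [pvAStep, pvBStep, if_neg hic]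
  rw [pv_fold2, pv_find_pat1 s sec.toList, pv_find_pat2 s sec.toList]
  rcases h1 : (pvOcc s).find? (fun p => pvMatchAt s sec.toList (p + 3)) with _ | p
  · rcases h2 : (pvOcc s).find? (fun p => decide (1 ≤ p) && pvMatchAt s ['#'] (p - 1) &&
        pvMatchAt s sec.toList (p + 3)) with _ | p
    · simp only [ne_eq, not_true, if_false]
    · have hp1 : 1 ≤ p := by
        have := List.find?_some h2
        simp only [Bool.and_eq_true, decide_eq_true_eq] at this
        exact this.1.1
      have hplen : p < s.length := pv_occ_lt (List.mem_of_find?_eq_some h2)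
      have hne : ¬ ((p - 1 : Nat) : Int) = -1 := by omega
      simp only [ne_eq, hne, not_true, not_false_eq_true, if_false, if_true]
      exact pv_end_eq s acc (p - 1) (by omega)
  · have hplen : p < s.length := pv_occ_lt (List.mem_of_find?_eq_some h1)
    have hne : ¬ ((p : Nat) : Int) = -1 := by omega
    simp only [ne_eq, hne, not_false_eq_true, if_true]
    exact pv_end_eq s acc p hplen

-- ===== VERDICT (by name: the statement is the Claim_ definition above) =====
theorem extract_relevant_sections_py_spec : Claim_equal_extract_relevant_sections_py := by
  intro full_text sections _
  unfold Spec_extract_relevant_sections_py extract_relevant_sections_py extract_relevant_sections_py_alt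
  have h : pvAStep full_text.toList = pvBStep full_text.toList (pvOcc full_text.toList) := by
    funext acc sec
    exact pv_step_eq _ _ _
  rw [h]
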